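-- pv_equiv track=rewrite | github.com/linhdvu14/cp-sols | sols/CodeForces/1884_d2/C_Medium_Design.py | solve
-- ===== SOURCE A (Python) =====
-- def solve(N, M, segs):
--     def max_cover(segs):
--         pts = []
--         for l, r in segs: pts += [[l, 1], [r + 1, -1]]
--         pts.sort()
--
--         res = cnt = 0
--         for _, a in pts:
--             cnt += a
--             res = max(res, cnt)
--
--         return res
--
--     res = max(
--         max_cover([s for s in segs if s[0] != 1]),
--         max_cover([s for s in segs if s[-1] != M]),
--     )
--
--     return res
-- ===== SOURCE B (Python) =====
-- def solve(N, M, segs):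
--     def max_cover(ss):
--         # overlap at a point p = segments started by p minus segments ended before p;
--         # the maximum overlap is attained at some left endpoint, so check each one
--         best = 0
--         for l, _ in ss:
--             started = sum(1 for l2, _ in ss if l2 <= l)
--             ended = sum(1 for _, r2 in ss if r2 < l)
--             best = max(best, started - ended)
--         return best
--
--     return max(
--         max_cover([s for s in segs if s[0] != 1]),
--         max_cover([s for s in segs if s[1] != M]),
--     )
-- ===== Notes on version B (the rewrite author's own statement) =====
-- stated objective: alternative
-- what changed: max_cover drops the event list and sorting entirely: for each left endpoint it directly counts segments started by it minus segments already ended before it (max overlap is attained at a left endpoint), a quadratic brute force instead of the sorted sweep.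
import Mathlib
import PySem

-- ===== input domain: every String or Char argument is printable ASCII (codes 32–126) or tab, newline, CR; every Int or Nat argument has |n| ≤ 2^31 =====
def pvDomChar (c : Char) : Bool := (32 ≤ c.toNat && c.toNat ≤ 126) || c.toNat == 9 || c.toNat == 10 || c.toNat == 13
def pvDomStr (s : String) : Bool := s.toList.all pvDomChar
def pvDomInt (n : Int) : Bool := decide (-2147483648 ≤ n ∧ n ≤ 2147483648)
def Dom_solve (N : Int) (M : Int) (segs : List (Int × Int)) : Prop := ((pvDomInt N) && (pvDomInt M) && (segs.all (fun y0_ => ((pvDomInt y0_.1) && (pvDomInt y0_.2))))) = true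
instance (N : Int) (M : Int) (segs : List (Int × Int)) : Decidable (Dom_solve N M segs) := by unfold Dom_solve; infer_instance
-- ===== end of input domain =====

-- B drops A's event list + sort + prefix-sum sweep: for each left endpoint it directly
-- counts segments started by it minus segments ended before it, and takes the maximum.

-- ===== PORT A =====
-- inner helper max_cover of A: build [l,1],[r+1,-1] events, sort, prefix-sum max
def maxCoverA (segs : List (Int × Int)) : Int :=
  ((PySem.List.sorted2
      (segs.foldl (fun acc lr => acc ++ [(lr.1, (1 : Int)), (lr.2 + 1, (-1 : Int))]) [])
      Prod.fst Prod.snd).foldl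
    (fun rc p => (max rc.1 (rc.2 + p.2), rc.2 + p.2)) ((0 : Int), (0 : Int))).1

def solve (N : Int) (M : Int) (segs : List (Int × Int)) : Int :=
  max (maxCoverA (segs.filter (fun s => s.1 != 1)))
      (maxCoverA (segs.filter (fun s => s.2 != M)))

-- ===== PORT B =====
-- B's max_cover: for each left endpoint l, started(l) - ended(l); running best
def maxCoverB (ss : List (Int × Int)) : Int :=
  ss.foldl (fun best lr =>
    max best ((ss.countP (fun s => decide (s.1 ≤ lr.1)) : Int)
              - (ss.countP (fun s => decide (s.2 < lr.1)) : Int))) 0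

def solve_alt (N : Int) (M : Int) (segs : List (Int × Int)) : Int :=
  max (maxCoverB (segs.filter (fun s => s.1 != 1)))
      (maxCoverB (segs.filter (fun s => s.2 != M)))

-- ===== PRECONDITION & SPEC =====
def Spec_solve (N : Int) (M : Int) (segs : List (Int × Int)) (out : Int) : Prop := out = solve_alt N M segs
instance (N : Int) (M : Int) (segs : List (Int × Int)) (out : Int) : Decidable (Spec_solve N M segs out) := by unfold Spec_solve; infer_instance

-- ===== CLAIM (what is proved, stated in full; the proofs are below) =====
def Claim_equal_solve : Prop := ∀ (N : Int) (M : Int) (segs : List (Int × Int)), Dom_solve N M segs → Spec_solve N M segs (solve N M segs)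

-- ===== LEMMAS AND PROOFS =====

-- lexicographic ≤ on events, the order in which A's pts.sort() lists them
def lexLe (a b : Int × Int) : Prop := a.1 < b.1 ∨ (a.1 = b.1 ∧ a.2 ≤ b.2)

-- the boolean comparator PySem.List.sorted2 uses with keys fst, snd
def ltp (a b : Int × Int) : Bool :=
  decide (a.1 < b.1) || (!decide (b.1 < a.1) && decide (a.2 < b.2))

theorem lexLe_trans {a b c : Int × Int} (h1 : lexLe a b) (h2 : lexLe b c) : lexLe a c := by
  unfold lexLe at *; omega

theorem ltp_false_iff (a b : Int × Int) : ltp b a = false ↔ lexLe a b := by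
  simp [ltp, lexLe]; omega

theorem ltp_true_lexLe {a b : Int × Int} (h : ltp a b = true) : lexLe a b := by
  simp [ltp] at h; unfold lexLe; omega

theorem insertBy_pairwise (x : Int × Int) (ys : List (Int × Int))
    (h : ys.Pairwise lexLe) : (PySem.List.insertBy ltp x ys).Pairwise lexLe := by
  induction ys with
  | nil => simp [PySem.List.insertBy]
  | cons y ys ih =>
      rw [List.pairwise_cons] at h
      rw [show PySem.List.insertBy ltp x (y :: ys)
            = if ltp x y = true then x :: y :: ys else y :: PySem.List.insertBy ltp x ys from rfl]
      by_cases hb : ltp x y = true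
      · rw [if_pos hb]
        refine List.Pairwise.cons ?_ (List.Pairwise.cons h.1 h.2)
        intro z hz
        rcases List.mem_cons.mp hz with rfl | hz
        · exact ltp_true_lexLe hb
        · exact lexLe_trans (ltp_true_lexLe hb) (h.1 z hz)
      · rw [if_neg hb]
        refine List.Pairwise.cons ?_ (ih h.2)
        intro z hz
        rcases (PySem.List.mem_insertBy ltp x z ys).mp hz with rfl | hz
        · exact (ltp_false_iff y z).mp (Bool.eq_false_iff.mpr hb)
        · exact h.1 z hz

theorem foldl_insertBy_pairwise (pts : List (Int × Int)) (acc : List (Int × Int))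
    (h : acc.Pairwise lexLe) :
    (pts.foldl (fun acc x => PySem.List.insertBy ltp x acc) acc).Pairwise lexLe := by
  induction pts generalizing acc with
  | nil => exact h
  | cons p pts ih => exact ih _ (insertBy_pairwise p acc h)

theorem sorted2_unfold (pts : List (Int × Int)) :
    PySem.List.sorted2 pts Prod.fst Prod.snd false
      = pts.foldl (fun acc x => PySem.List.insertBy ltp x acc) [] := rfl

-- sum of the deltas of the events with key ≤ p
def sumLe (q : List (Int × Int)) (p : Int) : Int :=
  ((q.filter (fun e => decide (e.1 ≤ p))).map Prod.snd).sum

-- candidate values of the prefix-sum maximum: one per +1 event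
def cand (q : List (Int × Int)) (c0 : Int) : List Int :=
  (q.filter (fun e => e.2 == 1)).map (fun e => c0 + sumLe q e.1)

theorem foldl_max_init (L : List Int) (r x : Int) :
    L.foldl max (max r x) = max (L.foldl max r) x := by
  induction L generalizing r with
  | nil => rfl
  | cons a L ih =>
      simp only [List.foldl_cons]
      rw [show max (max r x) a = max (max r a) x by omega, ih]

theorem init_le_foldl_max (L : List Int) (r : Int) : r ≤ L.foldl max r := by
  induction L generalizing r with
  | nil => exact le_refl r
  | cons a L ih => exact le_trans (le_max_left r a) (ih _)

theorem mem_le_foldl_max {L : List Int} {x : Int} (hx : x ∈ L) (r : Int) :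
    x ≤ L.foldl max r := by
  induction L generalizing r with
  | nil => cases hx
  | cons a L ih =>
      rcases List.mem_cons.mp hx with rfl | hx
      · exact le_trans (le_max_right r x) (init_le_foldl_max L _)
      · exact ih hx _

theorem foldl_max_perm {L1 L2 : List Int} (h : L1.Perm L2) (r : Int) :
    L1.foldl max r = L2.foldl max r := by
  induction h generalizing r with
  | nil => rfl
  | cons x _ ih => simp only [List.foldl_cons]; exact ih _
  | swap x y L =>
      simp only [List.foldl_cons]
      rw [show max (max r y) x = max (max r x) y by omega]
  | trans _ _ ih1 ih2 => exact (ih1 r).trans (ih2 r)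

theorem sum_ones (l : List Int) (h : ∀ x ∈ l, x = 1) : l.sum = l.length := by
  induction l with
  | nil => rfl
  | cons a l ih =>
      rw [List.sum_cons, h a (List.mem_cons_self), ih (fun x hx => h x (List.mem_cons_of_mem a hx))]
      simp; omega

-- A's prefix-sum sweep over a sorted ±1 event list = max over +1-event candidates
theorem sortedFold (q : List (Int × Int)) (res c0 : Int)
    (hs : q.Pairwise lexLe) (hδ : ∀ e ∈ q, e.2 = 1 ∨ e.2 = -1) (hc : c0 ≤ res) :
    (q.foldl (fun rc p => (max rc.1 (rc.2 + p.2), rc.2 + p.2)) (res, c0)).1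
      = (cand q c0).foldl max res := by
  induction q generalizing res c0 with
  | nil => simp [cand]
  | cons e q ih =>
      obtain ⟨p, a⟩ := e
      rw [List.pairwise_cons] at hs
      have hhead := hs.1
      have ha := hδ (p, a) List.mem_cons_self
      have hδq : ∀ e ∈ q, e.2 = 1 ∨ e.2 = -1 := fun e he => hδ e (List.mem_cons_of_mem _ he)
      have htail : (q.filter (fun e => e.2 == 1)).map (fun e => c0 + sumLe ((p, a) :: q) e.1)
          = (q.filter (fun e => e.2 == 1)).map (fun e => c0 + a + sumLe q e.1) := by
        refine List.map_congr_left ?_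
        intro e he
        have he' := List.mem_filter.mp he
        have hle : p ≤ e.1 := by
          rcases hhead e he'.1 with h | ⟨h, _⟩ <;> omega
        unfold sumLe
        rw [List.filter_cons]
        rw [if_pos (by simpa using hle)]
        simp only [List.map_cons, List.sum_cons]
        omega
      have hlhs : (((p, a) :: q).foldl
            (fun rc p => (max rc.1 (rc.2 + p.2), rc.2 + p.2)) (res, c0)).1
          = ((q.filter (fun e => e.2 == 1)).map (fun e => c0 + a + sumLe q e.1)).foldl max
              (max res (c0 + a)) := by
        simp only [List.foldl_cons]
        rw [ih _ _ hs.2 hδq (le_max_right _ _)]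
        rfl
      rcases ha with ha | ha
      · -- head is a +1 event
        subst ha
        have hfilt : ∀ e ∈ q.filter (fun e => decide (e.1 ≤ p)), e.2 = 1 := by
          intro e he
          have he' := List.mem_filter.mp he
          have := hhead e he'.1
          have hle : e.1 ≤ p := by simpa using he'.2
          rcases hδq e he'.1 with h | h
          · exact h
          · exfalso; unfold lexLe at this; omega
        have ht0 : 0 ≤ sumLe q p := by
          unfold sumLe
          rw [sum_ones _ (by intro x hx; rcases List.mem_map.mp hx with ⟨e, he, rfl⟩; exact hfilt e he)]
          positivity
        have hheadval : sumLe ((p, (1:Int)) :: q) p = 1 + sumLe q p := by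
          unfold sumLe
          rw [List.filter_cons, if_pos (by simp)]
          simp
        rw [hlhs]
        unfold cand
        rw [List.filter_cons, if_pos (by simp), List.map_cons, htail, List.foldl_cons,
          hheadval, foldl_max_init, foldl_max_init]
        by_cases hz : sumLe q p = 0
        · rw [hz]; norm_num
        · -- the head candidate duplicates the candidate of some (p,1) in q
          have hne : q.filter (fun e => decide (e.1 ≤ p)) ≠ [] := by
            intro h
            apply hz
            unfold sumLe
            rw [h]; rfl
          obtain ⟨e0, he0⟩ := List.exists_mem_of_ne_nil _ hne
          have he0' := List.mem_filter.mp he0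
          have he0p : e0.1 = p := by
            have := hhead e0 he0'.1
            have hle : e0.1 ≤ p := by simpa using he0'.2
            unfold lexLe at this; omega
          have he02 : e0.2 = 1 := hfilt e0 he0
          have hmem : c0 + 1 + sumLe q p
              ∈ (q.filter (fun e => e.2 == 1)).map (fun e => c0 + 1 + sumLe q e.1) := by
            refine List.mem_map.mpr ⟨e0, List.mem_filter.mpr ⟨he0'.1, by simp [he02]⟩, by rw [he0p]⟩
          have h1 : c0 + 1 + sumLe q p
              ≤ ((q.filter (fun e => e.2 == 1)).map (fun e => c0 + 1 + sumLe q e.1)).foldl max res :=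
            mem_le_foldl_max hmem res
          omega
      · -- head is a -1 event: no candidate, and the dip is below res
        subst ha
        rw [hlhs]
        unfold cand
        rw [List.filter_cons, if_neg (by simp), htail]
        rw [show max res (c0 + -1) = res by omega]

theorem filter_starts (ss : List (Int × Int)) :
    (ss.flatMap (fun lr => [(lr.1, (1:Int)), (lr.2 + 1, (-1:Int))])).filter
        (fun e => e.2 == 1)
      = ss.map (fun s => (s.1, (1:Int))) := by
  induction ss with
  | nil => rfl
  | cons s ss ih => simp [List.flatMap_cons, ih]

theorem sumLe_ev (ss : List (Int × Int)) (x : Int) :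
    sumLe (ss.flatMap (fun lr => [(lr.1, (1:Int)), (lr.2 + 1, (-1:Int))])) x
      = (ss.countP (fun s => decide (s.1 ≤ x)) : Int)
        - (ss.countP (fun s => decide (s.2 < x)) : Int) := by
  induction ss with
  | nil => rfl
  | cons s ss ih =>
      unfold sumLe at *
      simp only [List.flatMap_cons, List.cons_append, List.nil_append]
      by_cases h1 : s.1 ≤ x <;> by_cases h2 : s.2 < x
      · rw [List.filter_cons_of_pos (by simpa using h1),
            List.filter_cons_of_pos (by simp; omega),
            List.countP_cons_of_pos (by simpa using h1),
            List.countP_cons_of_pos (by simpa using h2),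
            List.map_cons, List.sum_cons, List.map_cons, List.sum_cons, ih]
        push_cast; omega
      · rw [List.filter_cons_of_pos (by simpa using h1),
            List.filter_cons_of_neg (by simp; omega),
            List.countP_cons_of_pos (by simpa using h1),
            List.countP_cons_of_neg (by simpa using h2),
            List.map_cons, List.sum_cons, ih]
        push_cast; omega
      · rw [List.filter_cons_of_neg (by simpa using h1),
            List.filter_cons_of_pos (by simp; omega),
            List.countP_cons_of_neg (by simpa using h1),
            List.countP_cons_of_pos (by simpa using h2),
            List.map_cons, List.sum_cons, ih]
        push_cast; omega
      · rw [List.filter_cons_of_neg (by simpa using h1),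
            List.filter_cons_of_neg (by simp; omega),
            List.countP_cons_of_neg (by simpa using h1),
            List.countP_cons_of_neg (by simpa using h2), ih]

theorem maxCover_eq (ss : List (Int × Int)) : maxCoverA ss = maxCoverB ss := by
  unfold maxCoverA maxCoverB
  rw [PySem.List.foldl_append_eq_flatMap, List.nil_append]
  set ev := ss.flatMap (fun lr => [(lr.1, (1:Int)), (lr.2 + 1, (-1:Int))]) with hev
  have hperm : (PySem.List.sorted2 ev Prod.fst Prod.snd false).Perm ev :=
    PySem.List.sorted2_perm ev Prod.fst Prod.snd false
  have hpw : (PySem.List.sorted2 ev Prod.fst Prod.snd false).Pairwise lexLe := by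
    rw [sorted2_unfold]; exact foldl_insertBy_pairwise ev [] (by simp)
  have hδ : ∀ e ∈ PySem.List.sorted2 ev Prod.fst Prod.snd false, e.2 = 1 ∨ e.2 = -1 := by
    intro e he
    have : e ∈ ev := hperm.mem_iff.mp he
    rw [hev] at this
    rcases List.mem_flatMap.mp this with ⟨s, _, hm⟩
    rcases List.mem_cons.mp hm with rfl | hm
    · left; rfl
    · rcases List.mem_cons.mp hm with rfl | hm
      · right; rfl
      · cases hm
  rw [sortedFold _ 0 0 hpw hδ (le_refl 0)]
  have hsum : ∀ x, sumLe (PySem.List.sorted2 ev Prod.fst Prod.snd false) x = sumLe ev x := by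
    intro x
    unfold sumLe
    exact List.Perm.sum_eq (List.Perm.map _ (List.Perm.filter _ hperm))
  have hcand : (cand (PySem.List.sorted2 ev Prod.fst Prod.snd false) 0).Perm (cand ev 0) := by
    unfold cand
    refine List.Perm.trans (List.Perm.map _ (List.Perm.filter _ hperm)) ?_
    rw [List.map_congr_left (fun e _ => by rw [hsum e.1])]
  rw [foldl_max_perm hcand 0]
  unfold cand
  rw [filter_starts, List.map_map, List.foldl_map]
  simp only [hev, Function.comp_def, zero_add, sumLe_ev]

-- ===== VERDICT (by name: the statement is the Claim_ definition above) =====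
theorem solve_spec : Claim_equal_solve := by
  intro N M segs _
  show solve N M segs = solve_alt N M segs
  unfold solve solve_alt
  rw [maxCover_eq, maxCover_eq]
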